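-- pv_equiv track=rewrite | github.com/LorenzoDGreco/Algo1 | RPL/3/6.py | palabra_mas_larga
-- ===== SOURCE A (Python) =====
-- def palabra_mas_larga(texto):
--     palabra_mas_larga = ""
--     palabra_actual = ""
--
--     for caracter in texto:
--         if(caracter == " "):
--             if (len(palabra_mas_larga) < len(palabra_actual)):
--                 palabra_mas_larga = ""
--                 palabra_mas_larga = palabra_actual
--             palabra_actual = ""
--         else:
--             palabra_actual += caracter
--
--     #Este ultimo if existe para confirmar la ultima palabra
--     if (len(palabra_mas_larga) < len(palabra_actual)):
--         palabra_mas_larga = ""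
--         palabra_mas_larga = palabra_actual
--
--     return palabra_mas_larga
-- ===== SOURCE B (Python) =====
-- def palabra_mas_larga(texto):
--     # Split on literal spaces (matching A's separator handling), then take
--     # the first word of maximal length; max on [""] gives "" for empty input.
--     return max(texto.split(" "), key=len)
-- ===== Notes on version B (the rewrite author's own statement) =====
-- stated objective: idiomatic
-- what changed: Replaces the hand-written character-by-character scan with running best/current buffers by a literal-space split followed by max(..., key=len), which picks the first longest word just as A's strict-less-than comparison does.
import Mathlib
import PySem

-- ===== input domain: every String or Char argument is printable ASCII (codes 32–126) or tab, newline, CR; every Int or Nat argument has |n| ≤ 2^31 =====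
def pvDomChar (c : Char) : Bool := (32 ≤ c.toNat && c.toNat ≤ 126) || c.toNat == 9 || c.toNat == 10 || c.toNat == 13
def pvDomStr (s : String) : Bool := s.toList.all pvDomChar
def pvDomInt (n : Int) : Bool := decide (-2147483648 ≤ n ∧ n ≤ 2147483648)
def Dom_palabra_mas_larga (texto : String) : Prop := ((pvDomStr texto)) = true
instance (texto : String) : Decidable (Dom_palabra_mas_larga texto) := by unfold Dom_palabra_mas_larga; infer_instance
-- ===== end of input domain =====

-- B replaces A's manual best/current character scan by split-on-space + first-longest selection (idiomatic; same cost).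


-- ===== PORT A =====
-- loop body: on ' ' promote the current word if strictly longer, else append the char
def pmlStep (st : List Char × List Char) (c : Char) : List Char × List Char :=
  if c = ' ' then
    (if st.1.length < st.2.length then st.2 else st.1, [])
  else (st.1, st.2 ++ [c])

def palabra_mas_larga (texto : String) : String :=
  let st := texto.toList.foldl pmlStep ([], [])
  String.ofList (if st.1.length < st.2.length then st.2 else st.1)

-- ===== PORT B =====
def palabra_mas_larga_alt (texto : String) : String :=
  match PySem.Str.split? texto " " with
  | some words => (PySem.List.max? words PySem.Str.len).getD ""
  | none => ""   -- unreachable: the separator " " is nonempty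

-- ===== PRECONDITION & SPEC =====
def Spec_palabra_mas_larga (texto : String) (out : String) : Prop := out = palabra_mas_larga_alt texto
instance (texto : String) (out : String) : Decidable (Spec_palabra_mas_larga texto out) := by unfold Spec_palabra_mas_larga; infer_instance

-- ===== CLAIM (what is proved, stated in full; the proofs are below) =====
def Claim_equal_palabra_mas_larga : Prop := ∀ (texto : String), Dom_palabra_mas_larga texto → Spec_palabra_mas_larga texto (palabra_mas_larga texto)

-- ===== LEMMAS AND PROOFS =====

-- the list of words of cs when the word read so far is cur (forward order)
def pword : List Char → List Char → List (List Char)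
  | [], cur => [cur]
  | c :: r, cur => if c = ' ' then cur :: pword r [] else pword r (cur ++ [c])

-- "keep the longer, first wins" step, shared shape of both sides
def lstep (b w : List Char) : List Char := if b.length < w.length then w else b

lemma pword_cons_nil (cs cur : List Char) :
    ∃ w ws, pword cs cur = w :: ws := by
  cases cs with
  | nil => exact ⟨cur, [], rfl⟩
  | cons c r =>
    by_cases h : c = ' '
    · exact ⟨cur, pword r [], by simp [pword, h]⟩
    · simp only [pword, if_neg h]; exact pword_cons_nil r (cur ++ [c])

lemma go_pword (l : List Char) : ∀ (fuel : Nat) (cur : List Char) (acc : List (List Char)),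
    l.length < fuel →
    PySem.Chars.splitOn.go [' '] fuel l cur acc = acc.reverse ++ pword l cur.reverse := by
  induction l with
  | nil =>
    intro fuel cur acc h
    rw [PySem.Chars.splitOn.go.eq_def]
    cases fuel with
    | zero => omega
    | succ f => simp [pword]
  | cons c rest ih =>
    intro fuel cur acc h
    cases fuel with
    | zero => simp at h
    | succ f =>
      rw [PySem.Chars.splitOn.go.eq_def]
      simp only [List.isPrefixOf]
      by_cases hc : c = ' '
      · subst hc
        simp only [beq_self_eq_true, Bool.true_and, if_true,
          List.length_cons, List.length_nil, List.drop_succ_cons, List.drop_zero]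
        rw [ih f [] (cur.reverse :: acc) (by simp only [List.length_cons] at h; omega)]
        simp [pword]
      · have hne : (' ' == c) = false := beq_eq_false_iff_ne.mpr (Ne.symm hc)
        simp only [hne, Bool.false_and, Bool.false_eq_true, if_false]
        rw [ih f (c :: cur) acc (by simp only [List.length_cons] at h; omega)]
        simp [pword, hc]

lemma splitOn_space (cs : List Char) :
    PySem.Chars.splitOn cs [' '] = pword cs [] := by
  rw [PySem.Chars.splitOn, go_pword cs (cs.length + 1) [] [] (by omega)]
  simp

-- A's loop + final check computes the lstep-fold over the word list
lemma loopA_pword (cs : List Char) : ∀ (best cur : List Char),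
    (if (cs.foldl pmlStep (best, cur)).1.length < (cs.foldl pmlStep (best, cur)).2.length
      then (cs.foldl pmlStep (best, cur)).2 else (cs.foldl pmlStep (best, cur)).1)
      = (pword cs cur).foldl lstep best := by
  induction cs with
  | nil => intro best cur; simp [pword, lstep]
  | cons c rest ih =>
    intro best cur
    by_cases hc : c = ' '
    · simp only [List.foldl_cons, pmlStep, pword, hc]
      exact ih (if best.length < cur.length then cur else best) []
    · simp only [List.foldl_cons, pmlStep, if_neg hc, pword]
      exact ih best (cur ++ [c])

lemma lstep_nil (w : List Char) : lstep [] w = w := by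
  cases w <;> simp [lstep]

-- B's max?-fold over the mapped word list is the lstep-fold, carried through String.ofList
-- B's max(..., key=len) as a named fold step
def mstep (acc : Option String) (x : String) : Option String :=
  match acc with
  | none => some x
  | some m => if PySem.Str.len m < PySem.Str.len x then some x else some m

lemma max?_eq_foldl (xs : List String) :
    PySem.List.max? xs PySem.Str.len = xs.foldl mstep none := by
  unfold PySem.List.max? mstep
  congr 1
  funext acc x
  cases acc <;> rfl

lemma maxfold_lstep (ws : List (List Char)) : ∀ (b : List Char),
    (ws.map String.ofList).foldl mstep (some (String.ofList b))
      = some (String.ofList (ws.foldl lstep b)) := by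
  induction ws with
  | nil => intro b; simp
  | cons w rest ih =>
    intro b
    simp only [List.map_cons, List.foldl_cons, mstep]
    have hstep : (if PySem.Str.len (String.ofList b) < PySem.Str.len (String.ofList w)
          then some (String.ofList w) else some (String.ofList b))
        = some (String.ofList (lstep b w)) := by
      simp only [PySem.Str.len, String.toList_ofList, lstep]
      by_cases h : b.length < w.length
      · rw [if_pos (by exact_mod_cast h), if_pos h]
      · rw [if_neg (by exact_mod_cast h), if_neg h]
    rw [hstep]
    exact ih (lstep b w)

-- ===== VERDICT (by name: the statement is the Claim_ definition above) =====
theorem palabra_mas_larga_spec : Claim_equal_palabra_mas_larga := by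
  intro texto _
  unfold Spec_palabra_mas_larga palabra_mas_larga palabra_mas_larga_alt
  rw [PySem.Str.split?]
  simp only [PySem.Chars.split?]
  rw [show ((" " : String).toList) = [' '] from rfl, splitOn_space]
  simp only [List.isEmpty_cons, Bool.false_eq_true, if_false, Option.map_some]
  obtain ⟨w, ws, hw⟩ := pword_cons_nil texto.toList []
  rw [loopA_pword texto.toList [] [], hw]
  simp only [List.foldl_cons, lstep_nil]
  rw [max?_eq_foldl]
  simp only [List.map_cons, List.foldl_cons]
  rw [show mstep none (String.ofList w) = some (String.ofList w) from rfl]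
  rw [maxfold_lstep ws w]
  simp
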